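-- pv_equiv track=rewrite | github.com/Henos78/Leetcode-challenges-2025 | 1470-shuffle-the-array/1470-shuffle-the-array.py | shuffle
-- ===== SOURCE A (Python) =====
-- from typing import List
--
-- def shuffle(nums: List[int], n: int) -> List[int]:
--     arr1  =  []
--     arr2 = []
--     res =[]
--     a,b = 0, n
--     m =n+1
--
--     while m>1:
--         arr1.append(nums[a])
--         arr2.append(nums[b])
--         a+=1
--         b+=1
--         m-=1
--
--     for i in range(len(arr1)):
--         res.append(arr1[i])
--         res.append(arr2[i])
--
--     return res
-- ===== SOURCE B (Python) =====
-- from typing import List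
--
-- def shuffle(nums: List[int], n: int) -> List[int]:
--     return [x for i in range(n) for x in (nums[i], nums[i + n])]
-- ===== Notes on version B (the rewrite author's own statement) =====
-- stated objective: simpler
-- what changed: Replaced A's three maintained buffers (build arr1 and arr2 with a countdown while-loop, then a second merge loop) by a single comprehension that indexes nums directly, interleaving nums[i] and nums[i+n] in one pass with no intermediate arrays.
import Mathlib
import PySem

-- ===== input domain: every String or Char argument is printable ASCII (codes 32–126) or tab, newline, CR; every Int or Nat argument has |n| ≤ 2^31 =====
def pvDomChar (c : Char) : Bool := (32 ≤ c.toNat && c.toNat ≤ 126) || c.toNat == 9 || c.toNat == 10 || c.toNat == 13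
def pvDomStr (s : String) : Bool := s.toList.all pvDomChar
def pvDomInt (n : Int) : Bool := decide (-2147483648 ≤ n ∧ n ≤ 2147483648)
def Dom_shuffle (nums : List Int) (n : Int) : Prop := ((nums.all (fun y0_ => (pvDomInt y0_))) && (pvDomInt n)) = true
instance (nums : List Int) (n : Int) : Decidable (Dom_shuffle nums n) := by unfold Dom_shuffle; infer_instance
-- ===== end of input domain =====

-- B replaces A's two buffer-building loops and merge pass by one direct-indexing comprehension (simpler; same return value, no speed claim).


-- ===== PORT A =====
-- the 'while m>1' loop: appends nums[a] to arr1 and nums[b] to arr2 each round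
-- (pyGetD with default 0: Pre_ guarantees the index is in range, so the default is never used)
def shuffleLoopA (nums : List Int) (a b m : Int) (arr1 arr2 : List Int) : List Int × List Int :=
  if m > 1 then
    shuffleLoopA nums (a + 1) (b + 1) (m - 1)
      (arr1 ++ [PySem.List.pyGetD nums a 0]) (arr2 ++ [PySem.List.pyGetD nums b 0])
  else (arr1, arr2)
termination_by m.toNat
decreasing_by omega

def shuffle (nums : List Int) (n : Int) : List Int :=
  let p := shuffleLoopA nums 0 n (n + 1) [] []
  let arr1 := p.1
  let arr2 := p.2
  (PySem.List.pyRange 0 (arr1.length : Int) 1).foldl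
    (fun res i => res ++ [PySem.List.pyGetD arr1 i 0, PySem.List.pyGetD arr2 i 0]) []

-- ===== PORT B =====
def shuffle_alt (nums : List Int) (n : Int) : List Int :=
  (PySem.List.pyRange 0 n 1).flatMap
    (fun i => [PySem.List.pyGetD nums i 0, PySem.List.pyGetD nums (i + n) 0])

-- ===== PRECONDITION & SPEC =====
-- Pre_ excludes exactly the inputs where A raises IndexError: n ≥ 1 with fewer than 2n elements.
def Pre_shuffle (nums : List Int) (n : Int) : Prop := n ≤ 0 ∨ 2 * n ≤ (nums.length : Int)
instance (nums : List Int) (n : Int) : Decidable (Pre_shuffle nums n) := by unfold Pre_shuffle; infer_instance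
def pvWitness_shuffle : List Int × Int := ([1, 2, 3, 4], 2)

def Spec_shuffle (nums : List Int) (n : Int) (out : List Int) : Prop := out = shuffle_alt nums n
instance (nums : List Int) (n : Int) (out : List Int) : Decidable (Spec_shuffle nums n out) := by unfold Spec_shuffle; infer_instance

-- ===== CLAIM (what is proved, stated in full; the proofs are below) =====
def Claim_equal_shuffle : Prop := ∀ (nums : List Int) (n : Int), Dom_shuffle nums n → Pre_shuffle nums n → Spec_shuffle nums n (shuffle nums n)

-- ===== LEMMAS AND PROOFS =====

-- the while-loop appends the k values nums[a..a+k-1] to arr1 and nums[b..b+k-1] to arr2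
theorem shuffleLoopA_eq (nums : List Int) (k : Nat) :
    ∀ (a b : Int) (arr1 arr2 : List Int),
      shuffleLoopA nums a b ((k : Int) + 1) arr1 arr2 =
        (arr1 ++ (PySem.List.pyRange 0 (k : Int) 1).map (fun i => PySem.List.pyGetD nums (a + i) 0),
         arr2 ++ (PySem.List.pyRange 0 (k : Int) 1).map (fun i => PySem.List.pyGetD nums (b + i) 0)) := by
  induction k with
  | zero =>
      intro a b arr1 arr2
      rw [shuffleLoopA, if_neg (by omega)]
      simp [PySem.List.pyRange_one_eq_nil]
  | succ k ih =>
      intro a b arr1 arr2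
      rw [shuffleLoopA, if_pos (by push_cast; omega)]
      have hm : ((k + 1 : Nat) : Int) + 1 - 1 = (k : Int) + 1 := by push_cast; ring
      rw [hm, ih]
      have hcons : PySem.List.pyRange 0 ((k + 1 : Nat) : Int) 1
          = 0 :: PySem.List.pyRange 1 ((k + 1 : Nat) : Int) 1 :=
        PySem.List.pyRange_one_cons (by push_cast; omega)
      have hshift : ∀ (c : Int), (PySem.List.pyRange 1 ((k + 1 : Nat) : Int) 1).map
            (fun i => PySem.List.pyGetD nums (c + i) 0)
          = (PySem.List.pyRange 0 (k : Int) 1).map (fun i => PySem.List.pyGetD nums (c + 1 + i) 0) := by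
        intro c
        rw [PySem.List.pyRange_one 1, PySem.List.pyRange_one 0]
        have h1 : (((k + 1 : Nat) : Int) - 1).toNat = k := by omega
        have h2 : ((k : Int) - 0).toNat = k := by omega
        rw [h1, h2, List.map_map, List.map_map]
        apply List.map_congr_left
        intro j _
        simp only [Function.comp]
        congr 1
        ring
      rw [hcons]
      simp only [List.map_cons, add_zero, hshift]
      simp [List.append_assoc]

theorem shuffle_spec : Claim_equal_shuffle := by
  intro nums n _ hpre
  unfold Spec_shuffle shuffle shuffle_alt
  by_cases hn : n ≤ 0
  · rw [shuffleLoopA, if_neg (by omega)]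
    simp [PySem.List.pyRange_one_eq_nil hn, PySem.List.pyRange_one_eq_nil (by norm_num : (0:Int) ≤ 0)]
  · have hn' : 0 < n := by omega
    have hk : ((n.toNat : Int)) = n := by omega
    have hm : n + 1 = ((n.toNat : Int)) + 1 := by omega
    rw [hm, shuffleLoopA_eq nums n.toNat 0 n [] []]
    simp only [List.nil_append, List.length_map, PySem.List.length_pyRange_one, hk]
    have hlen : ((n - 0).toNat : Int) = n := by omega
    rw [hlen]
    rw [PySem.List.foldl_append_eq_flatMap]
    simp only [List.nil_append]
    apply List.flatMap_congr
    intro i hi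
    have hi' := (PySem.List.mem_pyRange_one).1 hi
    rw [PySem.List.pyGetD_map_pyRange_of_nonneg _ _ _ _ (by omega) (by omega),
        PySem.List.pyGetD_map_pyRange_of_nonneg _ _ _ _ (by omega) (by omega)]
    simp only [zero_add]
    rw [Int.add_comm n i]
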